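-- pv_equiv track=rewrite | github.com/renovate-bot/JohnStrunk-_-advent-of-ai-2025 | day06/part2.py | solve
-- ===== SOURCE A (Python) =====
-- def solve(input_lines: list[str]) -> int:
--     """Solve the worksheet for part 2 rules (column-wise digits)."""
--     # Each problem is a vertical column, separated by a full column of spaces
--     # The last row contains the operator for each problem
--     # The rest of the rows contain the digits for each problem, most significant at the top
--     rows: list[str] = [line.rstrip("\n") for line in input_lines]
--     if not rows:
--         return 0
--     n_rows: int = len(rows)
--     n_cols: int = max(len(row) for row in rows)
--     rows = [row.ljust(n_cols) for row in rows]
--     problems: list[tuple[list[int], str]] = []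
--     col: int = 0
--     while col < n_cols:
--         # Find the start of a problem (not all spaces in the number rows)
--         if all(rows[r][col] == " " for r in range(n_rows - 1)):
--             col += 1
--             continue
--         # Collect columns for this problem until we hit a full space column
--         problem_cols: list[int] = []
--         while col < n_cols and not all(rows[r][col] == " " for r in range(n_rows - 1)):
--             problem_cols.append(col)
--             col += 1
--         # For part 2, each column is a digit, bottom is least significant
--         numbers: list[int] = []
--         for c in problem_cols:
--             digits: list[str] = [rows[r][c] for r in range(n_rows - 1)]
--             num_str: str = "".join(d for d in digits if d != " ").strip()
--             if num_str:
--                 numbers.append(int(num_str))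
--         op: str = "".join(rows[n_rows - 1][c] for c in problem_cols).strip()
--         problems.append((numbers, op))
--     # Now solve each problem
--     total: int = 0
--     for numbers, op in problems:
--         if op == "+":
--             total += sum(numbers)
--         elif op == "*":
--             prod: int = 1
--             for n in numbers:
--                 prod *= n
--             total += prod
--         else:
--             raise ValueError(f"Unknown operator: {op}")
--     return total
-- ===== SOURCE B (Python) =====
-- def solve(input_lines: list[str]) -> int:
--     """Streaming single pass: fold over columns with running sum/product accumulators,
--     flushing at each blank column (plus a sentinel), never materialising problem lists."""
--     rows = [line.rstrip("\n") for line in input_lines]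
--     if not rows:
--         return 0
--     width = max(len(r) for r in rows)
--     num_rows = [r.ljust(width) for r in rows[:-1]]
--     op_row = rows[-1].ljust(width)
--     total = 0
--     in_problem = False
--     acc_sum = 0
--     acc_prod = 1
--     op = ""
--     for c in range(width + 1):  # c == width is a blank sentinel that flushes the last problem
--         blank = True
--         if c < width:
--             blank = all(r[c] == " " for r in num_rows)
--         if blank:
--             if in_problem:
--                 op_s = op.strip()
--                 if op_s == "+":
--                     total += acc_sum
--                 elif op_s == "*":
--                     total += acc_prod
--                 else:
--                     raise ValueError(f"Unknown operator: {op_s}")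
--                 in_problem = False
--             continue
--         if not in_problem:
--             in_problem = True
--             acc_sum = 0
--             acc_prod = 1
--             op = ""
--         op += op_row[c]
--         s = "".join(r[c] for r in num_rows if r[c] != " ").strip()
--         if s:
--             n = int(s)
--             acc_sum += n
--             acc_prod *= n
--     return total
-- ===== Notes on version B (the rewrite author's own statement) =====
-- stated objective: alternative
-- what changed: A stages the work (nested while loops collect each problem's column indices into a problems list, then a second loop evaluates each problem); B is a single streaming pass over column indices with constant state (running sum, running product, collected op chars, in-problem flag) that flushes at each blank column and a final sentinel, never materialising problem or number lists.
import Mathlib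
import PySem

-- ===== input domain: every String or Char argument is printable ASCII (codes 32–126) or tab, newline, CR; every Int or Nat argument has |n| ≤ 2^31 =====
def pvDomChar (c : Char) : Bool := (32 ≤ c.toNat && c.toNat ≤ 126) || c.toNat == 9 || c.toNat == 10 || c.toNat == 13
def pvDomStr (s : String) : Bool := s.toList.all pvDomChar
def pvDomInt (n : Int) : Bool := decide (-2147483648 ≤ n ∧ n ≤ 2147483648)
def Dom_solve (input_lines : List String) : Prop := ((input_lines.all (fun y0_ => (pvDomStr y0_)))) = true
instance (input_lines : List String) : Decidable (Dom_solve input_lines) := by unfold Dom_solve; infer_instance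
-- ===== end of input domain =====

-- B replaces A's staged collect-then-evaluate (nested while loops building a problems list,
-- then an evaluation loop) by ONE streaming pass over column indices with constant state
-- (running sum, running product, op chars, in-problem flag), flushed at blank columns and a
-- final sentinel (objective: alternative decomposition, same cost).

-- ===== PORT A =====
-- shared helpers for both Pythons' identical preamble:
-- line.rstrip("\n") — removes exactly the trailing '\n' characters (hand port, exact)
def pvRstripNl (cs : List Char) : List Char := (cs.reverse.dropWhile (· == '\n')).reverse
-- row.ljust(w) — pad with spaces on the right (hand port, exact)
def pvLjust (cs : List Char) (w : Nat) : List Char := cs ++ List.replicate (w - cs.length) ' '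

-- rows[r][col]: after ljust every access A makes is in range, so getD is exact there
def pvAt (rows : List (List Char)) (r c : Nat) : Char := (rows.getD r []).getD c ' '

-- all(rows[r][col] == " " for r in range(n_rows - 1))
def pvBlankA (rows : List (List Char)) (nrows c : Nat) : Bool :=
  (List.range (nrows - 1)).all (fun r => pvAt rows r c == ' ')

-- inner while loop: collect problem_cols until a blank column; returns (problem_cols, next col)
def pvCollect (rows : List (List Char)) (nrows ncols col : Nat) : List Nat × Nat :=
  if col < ncols then
    if pvBlankA rows nrows col then ([], col)
    else
      let r := pvCollect rows nrows ncols (col + 1)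
      (col :: r.1, r.2)
  else ([], col)
termination_by ncols - col

theorem pvCollect_le (rows : List (List Char)) (nrows ncols col : Nat) :
    col ≤ (pvCollect rows nrows ncols col).2 := by
  induction col using pvCollect.induct rows nrows ncols with
  | case1 col h hb => rw [pvCollect]; simp [h, hb]
  | case2 col h hb ih => rw [pvCollect]; simp [h, hb]; omega
  | case3 col h => rw [pvCollect]; simp [h]

-- for numbers: digits of column c, spaces removed, stripped, int()-ed if non-empty
def pvNumbers (rows : List (List Char)) (nrows : Nat) (pcols : List Nat) : List Int :=
  pcols.foldl (fun numbers c =>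
    let digits := (List.range (nrows - 1)).map (fun r => pvAt rows r c)
    let numStr := PySem.Chars.strip (digits.filter (fun d => d ≠ ' '))
    if numStr ≠ [] then numbers ++ [(PySem.Int.ofChars? numStr).getD 0] else numbers) []

def pvOp (rows : List (List Char)) (nrows : Nat) (pcols : List Nat) : List Char :=
  PySem.Chars.strip (pcols.map (fun c => pvAt rows (nrows - 1) c))

theorem pvCollect_lt (rows : List (List Char)) (nrows ncols col : Nat)
    (h : col < ncols) (hb : pvBlankA rows nrows col = false) :
    col < (pvCollect rows nrows ncols col).2 := by
  have := pvCollect_le rows nrows ncols (col + 1)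
  rw [pvCollect]
  simp [h, hb]
  omega

-- outer while loop, building the problems list
def pvOuter (rows : List (List Char)) (nrows ncols col : Nat)
    (problems : List (List Int × List Char)) : List (List Int × List Char) :=
  if h : col < ncols then
    if hb : pvBlankA rows nrows col then pvOuter rows nrows ncols (col + 1) problems
    else
      let res := pvCollect rows nrows ncols col
      pvOuter rows nrows ncols res.2
        (problems ++ [(pvNumbers rows nrows res.1, pvOp rows nrows res.1)])
  else problems
termination_by ncols - col
decreasing_by
  · omega
  · have := pvCollect_lt rows nrows ncols col h (by simpa using hb)
    omega

-- final loop: evaluate each problem ('else' is where Python raises ValueError; Pre_solve excludes it)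
def pvEval (problems : List (List Int × List Char)) : Int :=
  problems.foldl (fun total p =>
    if p.2 = ['+'] then total + p.1.sum
    else if p.2 = ['*'] then total + p.1.foldl (· * ·) 1
    else total) 0

def solve (input_lines : List String) : Int :=
  let rows := input_lines.map (fun line => pvRstripNl line.toList)
  if rows = [] then 0
  else
    let nrows := rows.length
    let ncols := ((rows.map List.length).max?).getD 0  -- max(...) on a nonempty list, exact
    let rows2 := rows.map (fun row => pvLjust row ncols)
    pvEval (pvOuter rows2 nrows ncols 0 [])

-- ===== PORT B =====
-- one step of B's streaming pass; state = (total, in_problem, acc_sum, acc_prod, op chars);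
-- the invalid-operator 'else total' is where Python raises ValueError (excluded by Pre_solve)
def pvStepB (numRows : List (List Char)) (opRow : List Char) (width : Nat)
    (st : Int × Bool × Int × Int × List Char) (c : Nat) : Int × Bool × Int × Int × List Char :=
  let blank := if c < width then numRows.all (fun r => r.getD c ' ' == ' ') else true
  if blank then
    if st.2.1 then
      let ops := PySem.Chars.strip st.2.2.2.2
      let t := if ops = ['+'] then st.1 + st.2.2.1
        else if ops = ['*'] then st.1 + st.2.2.2.1
        else st.1
      (t, false, st.2.2.1, st.2.2.2.1, st.2.2.2.2)
    else st
  else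
    let st' := if st.2.1 then st else (st.1, true, (0 : Int), (1 : Int), ([] : List Char))
    let op' := st'.2.2.2.2 ++ [opRow.getD c ' ']
    let s := PySem.Chars.strip ((numRows.map (fun r => r.getD c ' ')).filter (fun ch => ch ≠ ' '))
    if s ≠ [] then
      let n := (PySem.Int.ofChars? s).getD 0
      (st'.1, true, st'.2.2.1 + n, st'.2.2.2.1 * n, op')
    else (st'.1, true, st'.2.2.1, st'.2.2.2.1, op')

def solve_alt (input_lines : List String) : Int :=
  let rows := input_lines.map (fun line => pvRstripNl line.toList)
  if rows = [] then 0
  else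
    let width := ((rows.map List.length).max?).getD 0
    let numRows := rows.dropLast.map (fun r => pvLjust r width)
    let opRow := pvLjust (rows.getLast?.getD []) width
    ((List.range (width + 1)).foldl (pvStepB numRows opRow width) (0, false, 0, 1, [])).1

-- ===== PRECONDITION & SPEC =====
-- Pre_solve excludes exactly the inputs on which A raises ValueError, stated in closed form over
-- the padded grid: for every maximal run [a,b) of columns whose number-row chars are not all
-- spaces, the stripped last-row string over the run must be "+" or "*", and every non-blank
-- column whose non-space digit string is non-empty must spell a valid int() literal.
def Pre_solve (input_lines : List String) : Prop :=
  let rows := input_lines.map (fun line => pvRstripNl line.toList)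
  let w := ((rows.map List.length).max?).getD 0
  let R := rows.map (fun row => pvLjust row w)
  let n := R.length
  let blank := fun c => (List.range (n - 1)).all (fun r => (R.getD r []).getD c ' ' == ' ')
  (∀ a ∈ List.range w, ∀ b ∈ List.range (w + 1),
     (a < b ∧ (∀ c ∈ List.range' a (b - a), blank c = false) ∧
      (a = 0 ∨ blank (a - 1)) ∧ (b = w ∨ blank b)) →
     (PySem.Chars.strip ((List.range' a (b - a)).map (fun c => (R.getD (n - 1) []).getD c ' ')) = ['+'] ∨
      PySem.Chars.strip ((List.range' a (b - a)).map (fun c => (R.getD (n - 1) []).getD c ' ')) = ['*'])) ∧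
  (∀ c ∈ List.range w, blank c = false →
     PySem.Chars.strip (((List.range (n - 1)).map (fun r => (R.getD r []).getD c ' ')).filter
       (fun ch => ch ≠ ' ')) ≠ [] →
     (PySem.Int.ofChars? (PySem.Chars.strip (((List.range (n - 1)).map
       (fun r => (R.getD r []).getD c ' ')).filter (fun ch => ch ≠ ' ')))).isSome)

instance (input_lines : List String) : Decidable (Pre_solve input_lines) := by
  unfold Pre_solve; infer_instance

def pvWitness_solve : List String := ["1 2", "3 4", "+ *"]

def Spec_solve (input_lines : List String) (out : Int) : Prop := out = solve_alt input_lines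
instance (input_lines : List String) (out : Int) : Decidable (Spec_solve input_lines out) := by
  unfold Spec_solve; infer_instance

-- ===== CLAIM (what is proved, stated in full; the proofs are below) =====
def Claim_equal_solve : Prop := ∀ (input_lines : List String), Dom_solve input_lines → Pre_solve input_lines → Spec_solve input_lines (solve input_lines)

-- ===== LEMMAS AND PROOFS =====

-- value of one problem in A's evaluation loop (0 where Python raises; Pre_solve excludes that)
def pvGP (p : List Int × List Char) : Int :=
  if p.2 = ['+'] then p.1.sum
  else if p.2 = ['*'] then p.1.foldl (· * ·) 1
  else 0

-- the optional number A extracts from column c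
def pvColNum (R : List (List Char)) (nrows c : Nat) : Option Int :=
  let digits := (List.range (nrows - 1)).map (fun r => pvAt R r c)
  let s := PySem.Chars.strip (digits.filter (fun d => d ≠ ' '))
  if s ≠ [] then some ((PySem.Int.ofChars? s).getD 0) else none

theorem pvEval_eq_sum (l : List (List Int × List Char)) : pvEval l = (l.map pvGP).sum := by
  unfold pvEval
  suffices h : ∀ (a : Int), l.foldl (fun total p =>
      if p.2 = ['+'] then total + p.1.sum
      else if p.2 = ['*'] then total + p.1.foldl (· * ·) 1
      else total) a = a + (l.map pvGP).sum by
    simpa using h 0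
  induction l with
  | nil => simp
  | cons x xs ih =>
    intro a
    simp only [List.foldl_cons, List.map_cons, List.sum_cons, ih]
    unfold pvGP
    split_ifs <;> ring

theorem foldl_filterMap_aux {α β : Type} (f : α → Option β) :
    ∀ (l : List α) (a : List β),
      l.foldl (fun acc x => acc ++ (f x).toList) a = a ++ l.filterMap f := by
  intro l
  induction l with
  | nil => simp
  | cons x xs ih =>
    intro a
    rw [List.foldl_cons, List.filterMap_cons]
    cases h : f x <;> simp [h, ih]

theorem pvNumbers_eq_filterMap (R : List (List Char)) (nrows : Nat) (cs : List Nat) :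
    pvNumbers R nrows cs = cs.filterMap (pvColNum R nrows) := by
  unfold pvNumbers
  have hstep : (fun (numbers : List Int) (c : Nat) =>
      let digits := (List.range (nrows - 1)).map (fun r => pvAt R r c)
      let numStr := PySem.Chars.strip (digits.filter (fun d => d ≠ ' '))
      if numStr ≠ [] then numbers ++ [(PySem.Int.ofChars? numStr).getD 0] else numbers)
      = fun (numbers : List Int) (c : Nat) => numbers ++ (pvColNum R nrows c).toList := by
    funext numbers c
    unfold pvColNum
    by_cases hx : PySem.Chars.strip (((List.range (nrows - 1)).map
        (fun r => pvAt R r c)).filter (fun d => !decide (d = ' '))) = [] <;> simp [hx]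
  rw [hstep]
  simpa using foldl_filterMap_aux (pvColNum R nrows) cs []

theorem getD_range_dropLast {α : Type} (xs : List α) (d : α) :
    (List.range (xs.length - 1)).map (fun r => xs.getD r d) = xs.dropLast := by
  induction xs with
  | nil => simp
  | cons x xs ih =>
    cases xs with
    | nil => simp
    | cons y ys =>
      have h1 : (x :: y :: ys).length - 1 = ((y :: ys).length - 1) + 1 := by simp
      rw [h1, List.range_succ_eq_map, List.map_cons, List.map_map]
      simp only [List.getD_cons_zero, Function.comp_def, Nat.succ_eq_add_one, List.getD_cons_succ]
      rw [ih]
      rfl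

-- A's blank test equals B's test over the dropLast rows
theorem blank_eq_dropLast (R : List (List Char)) (c : Nat) :
    pvBlankA R R.length c = R.dropLast.all (fun r => r.getD c ' ' == ' ') := by
  unfold pvBlankA pvAt
  have : (List.range (R.length - 1)).all (fun r => (R.getD r []).getD c ' ' == ' ')
      = ((List.range (R.length - 1)).map (fun r => R.getD r [])).all
          (fun row => row.getD c ' ' == ' ') := by
    rw [List.all_map]; rfl
  rw [this, getD_range_dropLast]

theorem digits_eq_dropLast (R : List (List Char)) (c : Nat) :
    (List.range (R.length - 1)).map (fun r => pvAt R r c)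
      = R.dropLast.map (fun r => r.getD c ' ') := by
  unfold pvAt
  rw [← getD_range_dropLast R [], List.map_map]
  rfl

theorem last_row_eq (R : List (List Char)) (c : Nat) (h : R ≠ []) :
    pvAt R (R.length - 1) c = (R.getLast?.getD []).getD c ' ' := by
  unfold pvAt
  rw [List.getLast?_eq_some_getLast h, List.getLast_eq_getElem h]
  have hlt : R.length - 1 < R.length := by
    cases R with | nil => exact absurd rfl h | cons a l => simp
  rw [List.getD_eq_getElem R [] hlt]
  rfl

theorem collect_spec (R : List (List Char)) (nrows : Nat) :
    ∀ (m col ncols : Nat), ncols = col + m →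
      pvCollect R nrows ncols col =
        ((List.range' col m).takeWhile (fun c => !pvBlankA R nrows c),
         col + ((List.range' col m).takeWhile (fun c => !pvBlankA R nrows c)).length) := by
  intro m
  induction m with
  | zero => intro col ncols h; rw [pvCollect]; simp [h]
  | succ m ih =>
    intro col ncols h
    rw [pvCollect]
    have hc : col < ncols := by omega
    by_cases hb : pvBlankA R nrows col = true
    · simp [hc, hb, List.range'_succ]
    · have hb' : pvBlankA R nrows col = false := by simpa using hb
      simp only [hc, if_true, hb', Bool.false_eq_true, if_false]
      rw [ih (col + 1) ncols (by omega)]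
      simp [List.range'_succ, hb']
      omega

theorem drop_range' : ∀ (n k s : Nat), (List.range' s n).drop k = List.range' (s + k) (n - k) := by
  intro n
  induction n with
  | zero => intro k s; simp
  | succ n ih =>
    intro k s
    cases k with
    | zero => simp
    | succ k => rw [List.range'_succ]; simpa [Nat.add_assoc, Nat.add_comm 1 k] using ih k (s + 1)

theorem dropWhile_eq_drop {α : Type} (l : List α) (p : α → Bool) :
    l.dropWhile p = l.drop (l.takeWhile p).length := by
  calc l.dropWhile p
      = (l.takeWhile p ++ l.dropWhile p).drop (l.takeWhile p).length := List.drop_left.symm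
    _ = l.drop (l.takeWhile p).length := by
        rw [List.takeWhile_append_dropWhile]

-- pvOuter's accumulator is only ever appended to
theorem pvOuter_probs (R : List (List Char)) (nrows ncols : Nat) :
    ∀ (m col : Nat), ncols = col + m → ∀ (probs : List (List Int × List Char)),
      pvOuter R nrows ncols col probs = probs ++ pvOuter R nrows ncols col [] := by
  intro m
  induction m using Nat.strong_induction_on with
  | _ m ih =>
    intro col hcol probs
    by_cases hc : col < ncols
    · by_cases hb : pvBlankA R nrows col = true
      · rw [pvOuter]
        conv_rhs => rw [pvOuter]
        simp only [hc, dif_pos, hb, if_true]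
        exact ih (m - 1) (by omega) (col + 1) (by omega) probs
      · rw [pvOuter]
        conv_rhs => rw [pvOuter]
        simp only [hc, dif_pos, hb, if_false]
        have hle := pvCollect_lt R nrows ncols col hc (by simpa using hb)
        have hub : (pvCollect R nrows ncols col).2 ≤ ncols := by
          rw [collect_spec R nrows m col ncols hcol]
          have h1 := congrArg List.length
            (List.takeWhile_append_dropWhile (l := List.range' col m)
              (p := fun c => !pvBlankA R nrows c))
          simp only [List.length_append, List.length_range'] at h1
          omega
        rw [ih (ncols - (pvCollect R nrows ncols col).2) (by omega)
            (pvCollect R nrows ncols col).2 (by omega),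
          ih (ncols - (pvCollect R nrows ncols col).2) (by omega)
            (pvCollect R nrows ncols col).2 (by omega)
            ([] ++ [(pvNumbers R nrows (pvCollect R nrows ncols col).1,
              pvOp R nrows (pvCollect R nrows ncols col).1)])]
        simp
    · rw [pvOuter]
      conv_rhs => rw [pvOuter]
      simp [hc]

theorem foldl_mul_shift (l : List Int) : ∀ (a b : Int),
    l.foldl (· * ·) (a * b) = a * l.foldl (· * ·) b := by
  induction l with
  | nil => intro a b; rfl
  | cons x xs ih =>
    intro a b
    show xs.foldl (· * ·) (a * b * x) = a * xs.foldl (· * ·) (b * x)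
    rw [mul_assoc, ih]

-- the four shapes of one B step, as equations
theorem stepB_blank_skip (numRows : List (List Char)) (opRow : List Char) (width c : Nat)
    (hb : (if c < width then numRows.all (fun r => r.getD c ' ' == ' ') else true) = true)
    (t s p : Int) (op : List Char) :
    pvStepB numRows opRow width (t, false, s, p, op) c = (t, false, s, p, op) := by
  unfold pvStepB
  rw [hb]
  simp

theorem stepB_blank_flush (numRows : List (List Char)) (opRow : List Char) (width c : Nat)
    (hb : (if c < width then numRows.all (fun r => r.getD c ' ' == ' ') else true) = true)
    (t s p : Int) (op : List Char) :
    pvStepB numRows opRow width (t, true, s, p, op) c =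
      ((if PySem.Chars.strip op = ['+'] then t + s
        else if PySem.Chars.strip op = ['*'] then t + p
        else t), false, s, p, op) := by
  unfold pvStepB
  rw [hb]
  simp

theorem stepB_nonblank (numRows : List (List Char)) (opRow : List Char) (width c : Nat)
    (hb : (if c < width then numRows.all (fun r => r.getD c ' ' == ' ') else true) = false)
    (t s p : Int) (op : List Char) :
    pvStepB numRows opRow width (t, true, s, p, op) c =
      (if PySem.Chars.strip ((numRows.map (fun r => r.getD c ' ')).filter
          (fun ch => ch ≠ ' ')) ≠ [] then
        (t, true,
         s + (PySem.Int.ofChars? (PySem.Chars.strip ((numRows.map (fun r => r.getD c ' ')).filter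
           (fun ch => ch ≠ ' ')))).getD 0,
         p * (PySem.Int.ofChars? (PySem.Chars.strip ((numRows.map (fun r => r.getD c ' ')).filter
           (fun ch => ch ≠ ' ')))).getD 0,
         op ++ [opRow.getD c ' '])
       else (t, true, s, p, op ++ [opRow.getD c ' '])) := by
  unfold pvStepB
  rw [hb]
  simp

theorem stepB_nonblank_start (numRows : List (List Char)) (opRow : List Char) (width c : Nat)
    (hb : (if c < width then numRows.all (fun r => r.getD c ' ' == ' ') else true) = false)
    (t s p : Int) (op : List Char) :
    pvStepB numRows opRow width (t, false, s, p, op) c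
      = pvStepB numRows opRow width (t, true, 0, 1, []) c := by
  unfold pvStepB
  rw [hb]
  simp

theorem getLast?_getD_map {α β : Type} (f : α → β) (l : List α) (h : l ≠ [])
    (d₁ : β) (d₂ : α) : (l.map f).getLast?.getD d₁ = f (l.getLast?.getD d₂) := by
  have hm : l.map f ≠ [] := by simpa using h
  rw [List.getLast?_eq_some_getLast hm, List.getLast?_eq_some_getLast h]
  simp [List.getLast_map]

theorem map_dropLast_comm {α β : Type} (f : α → β) (l : List α) :
    l.dropLast.map f = (l.map f).dropLast := by
  induction l with
  | nil => rfl
  | cons x xs ih =>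
    cases xs with
    | nil => rfl
    | cons y ys => simpa using ih

-- B's streaming fold over a run of non-blank columns, from an in-problem state
theorem run_fold (R : List (List Char)) (ncols : Nat) :
    ∀ (cs : List Nat), (∀ c ∈ cs, c < ncols ∧ pvBlankA R R.length c = false) →
    ∀ (t s p : Int) (op : List Char),
      cs.foldl (pvStepB R.dropLast (R.getLast?.getD []) ncols) (t, true, s, p, op)
        = (t, true, s + (cs.filterMap (pvColNum R R.length)).sum,
           p * (cs.filterMap (pvColNum R R.length)).foldl (· * ·) 1,
           op ++ cs.map (fun c => pvAt R (R.length - 1) c)) := by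
  intro cs
  induction cs with
  | nil => intro _ t s p op; simp
  | cons c cs ih =>
    intro h t s p op
    have hc : c < ncols := (h c (by simp)).1
    have hb : pvBlankA R R.length c = false := (h c (by simp)).2
    have hrest : ∀ d ∈ cs, d < ncols ∧ pvBlankA R R.length d = false :=
      fun d hd => h d (by simp [hd])
    have hR : R ≠ [] := by
      intro hempty
      rw [hempty] at hb
      simp [pvBlankA] at hb
    have hblank : (if c < ncols then R.dropLast.all (fun r => r.getD c ' ' == ' ') else true)
        = false := by
      rw [← blank_eq_dropLast]; simp [hc, hb]
    rw [List.foldl_cons, List.filterMap_cons, List.map_cons,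
      stepB_nonblank R.dropLast (R.getLast?.getD []) ncols c hblank t s p op]
    have hcol : pvColNum R R.length c
        = (if PySem.Chars.strip ((R.dropLast.map (fun r => r.getD c ' ')).filter
            (fun ch => ch ≠ ' ')) ≠ [] then
           some ((PySem.Int.ofChars? (PySem.Chars.strip ((R.dropLast.map (fun r => r.getD c ' ')).filter
             (fun ch => ch ≠ ' ')))).getD 0)
           else none) := by
      unfold pvColNum
      rw [digits_eq_dropLast]
    rw [hcol]
    by_cases hs : PySem.Chars.strip ((R.dropLast.map (fun r => r.getD c ' ')).filter
        (fun ch => ch ≠ ' ')) = []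
    · simp only [hs, ne_eq, not_true_eq_false, if_false, reduceIte]
      rw [ih hrest, ← last_row_eq R c hR]
      simp
    · simp only [hs, ne_eq, not_false_eq_true, if_true, reduceIte]
      rw [ih hrest, ← last_row_eq R c hR]
      have hfold : (cs.filterMap (pvColNum R R.length)).foldl (· * ·)
          ((1 : Int) * (PySem.Int.ofChars? (PySem.Chars.strip
            ((R.dropLast.map (fun r => r.getD c ' ')).filter (fun ch => ch ≠ ' ')))).getD 0)
          = (PySem.Int.ofChars? (PySem.Chars.strip
            ((R.dropLast.map (fun r => r.getD c ' ')).filter (fun ch => ch ≠ ' ')))).getD 0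
            * (cs.filterMap (pvColNum R R.length)).foldl (· * ·) 1 := by
        rw [show (1 : Int) * (PySem.Int.ofChars? (PySem.Chars.strip
            ((R.dropLast.map (fun r => r.getD c ' ')).filter (fun ch => ch ≠ ' ')))).getD 0
          = (PySem.Int.ofChars? (PySem.Chars.strip
            ((R.dropLast.map (fun r => r.getD c ' ')).filter (fun ch => ch ≠ ' ')))).getD 0 * 1
          from by ring]
        exact foldl_mul_shift _ _ _
      simp only [List.sum_cons, List.foldl_cons, hfold, Prod.mk.injEq, List.append_assoc,
        List.singleton_append]
      and_intros <;> first | rfl | ring1 | simp [List.append_assoc]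

-- main invariant: B's fold from a flushed state, followed by the sentinel flush, totals
-- A's staged evaluation of the problems from column col on
theorem main_inv (R : List (List Char)) (ncols : Nat) (hR : R ≠ []) :
    ∀ (m : Nat), ∀ (col : Nat), ncols = col + m → ∀ (t s p : Int) (op : List Char),
      (pvStepB R.dropLast (R.getLast?.getD []) ncols
        ((List.range' col m).foldl (pvStepB R.dropLast (R.getLast?.getD []) ncols)
          (t, false, s, p, op)) ncols).1
      = t + ((pvOuter R R.length ncols col []).map pvGP).sum := by
  intro m
  induction m using Nat.strong_induction_on with
  | _ m ih =>
    intro col hcol t s p op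
    by_cases hc : col < ncols
    · obtain ⟨m', rfl⟩ : ∃ m', m = m' + 1 := ⟨m - 1, by omega⟩
      by_cases hb : pvBlankA R R.length col = true
      · -- blank column: both sides skip it
        rw [List.range'_succ, List.foldl_cons,
          stepB_blank_skip R.dropLast (R.getLast?.getD []) ncols col
            (by rw [← blank_eq_dropLast]; simp [hc, hb]) t s p op,
          pvOuter]
        simp only [hc, dif_pos, hb, if_true]
        exact ih m' (by omega) (col + 1) (by omega) t s p op
      · -- non-blank column: a whole problem run
        have hb' : pvBlankA R R.length col = false := by simpa using hb
        rw [pvOuter]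
        simp only [hc, dif_pos, hb, if_false]
        rw [collect_spec R R.length (m' + 1) col ncols hcol]
        set tw := (List.range' col (m' + 1)).takeWhile (fun c => !pvBlankA R R.length c)
          with htw
        have htw_mem : ∀ c ∈ tw, c < ncols ∧ pvBlankA R R.length c = false := by
          intro c hcmem
          have h1 : c ∈ List.range' col (m' + 1) :=
            (List.takeWhile_sublist _).subset hcmem
          have h2 := List.mem_takeWhile_imp hcmem
          constructor
          · have := List.mem_range'_1.mp h1
            omega
          · simpa using h2
        have hklen : tw.length ≤ m' + 1 := by
          have h1 := congrArg List.length
            (List.takeWhile_append_dropWhile (l := List.range' col (m' + 1))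
              (p := fun c => !pvBlankA R R.length c))
          simp only [List.length_append, List.length_range'] at h1
          rw [← htw] at h1
          omega
        have htw_cons : tw = col :: (List.range' (col + 1) m').takeWhile
            (fun c => !pvBlankA R R.length c) := by
          rw [htw, List.range'_succ, List.takeWhile_cons]
          simp [hb']
        -- split the fold over range' col (m'+1) = tw ++ rest
        have hsplit : List.range' col (m' + 1)
            = tw ++ List.range' (col + tw.length) (m' + 1 - tw.length) := by
          conv_lhs => rw [← List.takeWhile_append_dropWhile
            (l := List.range' col (m' + 1)) (p := fun c => !pvBlankA R R.length c)]
          rw [dropWhile_eq_drop, ← htw, drop_range']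
        -- fold over tw from a flushed state
        have hfold_tw : tw.foldl (pvStepB R.dropLast (R.getLast?.getD []) ncols)
            (t, false, s, p, op)
            = (t, true, (tw.filterMap (pvColNum R R.length)).sum,
               (tw.filterMap (pvColNum R R.length)).foldl (· * ·) 1,
               tw.map (fun c => pvAt R (R.length - 1) c)) := by
          rw [htw_cons, List.foldl_cons,
            stepB_nonblank_start R.dropLast (R.getLast?.getD []) ncols col
              (by rw [← blank_eq_dropLast]; simp [hc, hb']) t s p op,
            ← List.foldl_cons, ← htw_cons, run_fold R ncols tw htw_mem]
          simp
        rw [hsplit, List.foldl_append, hfold_tw]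
        -- the value A's evaluation loop assigns to this run's problem
        have hgp : (if PySem.Chars.strip (tw.map (fun c => pvAt R (R.length - 1) c)) = ['+']
               then t + (tw.filterMap (pvColNum R R.length)).sum
               else if PySem.Chars.strip (tw.map (fun c => pvAt R (R.length - 1) c)) = ['*']
               then t + (tw.filterMap (pvColNum R R.length)).foldl (· * ·) 1
               else t)
            = t + pvGP (pvNumbers R R.length tw, pvOp R R.length tw) := by
          simp only [pvGP, pvOp, pvNumbers_eq_filterMap]
          split_ifs <;> ring
        by_cases hrest : m' + 1 - tw.length = 0
        · -- the run reaches the right edge; only the sentinel flushes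
          have hcol' : col + tw.length = ncols := by
            have hkpos : 1 ≤ tw.length := by rw [htw_cons]; simp
            omega
          rw [hrest]
          simp only [List.range'_zero, List.foldl_nil]
          rw [stepB_blank_flush R.dropLast (R.getLast?.getD []) ncols ncols (by simp),
            pvOuter_probs R R.length ncols 0 (col + tw.length) (by omega),
            show pvOuter R R.length ncols (col + tw.length) [] = [] from by
              rw [pvOuter]; simp [hcol']]
          simpa using hgp
        · -- a blank column follows the run: it flushes, then the invariant continues
          obtain ⟨m'', hm''⟩ : ∃ m'', m' + 1 - tw.length = m'' + 1 :=
            ⟨m' - tw.length, by omega⟩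
          have hd : col + tw.length < ncols := by omega
          have hdblank : pvBlankA R R.length (col + tw.length) = true := by
            have hcons : (List.range' col (m' + 1)).dropWhile (fun c => !pvBlankA R R.length c)
                = (col + tw.length) :: List.range' (col + tw.length + 1) m'' := by
              rw [dropWhile_eq_drop, ← htw, drop_range', hm'', List.range'_succ]
            have hne : (List.range' col (m' + 1)).dropWhile
                (fun c => !pvBlankA R R.length c) ≠ [] := by
              rw [hcons]; simp
            have hhead := List.head_dropWhile_not
              (p := fun c => !pvBlankA R R.length c) (l := List.range' col (m' + 1)) hne
            have hheadval : ((List.range' col (m' + 1)).dropWhile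
                (fun c => !pvBlankA R R.length c)).head hne = col + tw.length := by
              simp [hcons]
            rw [hheadval] at hhead
            simpa using hhead
          rw [hm'', List.range'_succ, List.foldl_cons,
            stepB_blank_flush R.dropLast (R.getLast?.getD []) ncols (col + tw.length)
              (by rw [← blank_eq_dropLast]; simp [hd, hdblank])]
          rw [hgp]
          rw [ih m'' (by omega) (col + tw.length + 1) (by omega)]
          rw [pvOuter_probs R R.length ncols (ncols - (col + tw.length))
            (col + tw.length) (by omega)]
          rw [show pvOuter R R.length ncols (col + tw.length) [] =
              pvOuter R R.length ncols (col + tw.length + 1) [] from by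
            rw [pvOuter]; simp [hd, hdblank]]
          rw [dif_neg (by simp : ¬ false = true)]
          simp only [List.nil_append, List.map_cons, List.map_append, List.sum_cons,
            List.sum_append, List.map_nil, List.sum_nil, add_zero]
          first | rfl | ring1 | simp
    · -- col ≥ ncols: nothing left, only the no-op sentinel
      have hm : m = 0 := by omega
      subst hm
      simp only [List.range'_zero, List.foldl_nil]
      rw [pvOuter]
      simp only [hc, dif_neg, not_false_iff]
      rw [stepB_blank_skip R.dropLast (R.getLast?.getD []) ncols ncols (by simp)]
      simp

-- ===== VERDICT (by name: the statement is the Claim_ definition above) =====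
theorem solve_spec : Claim_equal_solve := by
  intro input_lines _ _
  unfold Spec_solve solve solve_alt
  set rows := input_lines.map (fun line => pvRstripNl line.toList) with hrows
  by_cases h : rows = []
  · simp [h]
  · simp only [h, if_false]
    set ncols := ((rows.map List.length).max?).getD 0 with hncols
    set R := rows.map (fun row => pvLjust row ncols) with hRdef
    have hR : R ≠ [] := by simp [hRdef, h]
    have hlen : rows.length = R.length := by simp [hRdef]
    have hnum : rows.dropLast.map (fun r => pvLjust r ncols) = R.dropLast := by
      rw [hRdef, map_dropLast_comm]
    have hop : pvLjust (rows.getLast?.getD []) ncols = R.getLast?.getD [] := by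
      rw [hRdef]
      exact (getLast?_getD_map (fun row => pvLjust row ncols) rows h [] []).symm
    rw [hlen, hnum, hop]
    rw [show List.range (ncols + 1) = List.range' 0 ncols ++ [ncols] from by
      rw [List.range_eq_range', List.range'_1_concat]; norm_num]
    rw [List.foldl_append, List.foldl_cons, List.foldl_nil]
    rw [main_inv R ncols hR ncols 0 (by omega) 0 0 1 []]
    rw [pvEval_eq_sum]
    ring
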